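-- pv_equiv track=rewrite | github.com/zac-poe/photomosaic | mosaic.py | untile
-- ===== SOURCE A (Python) =====
-- def untile(tiles):
--     pixels = []
--     if not isinstance(tiles, list) or not isinstance(tiles[0], list):
--         raise ValueError("Provided tiles must be a nested list")
--     maxTileY = len(tiles[0])
--
--     absoluteX = -1  # allows for increment every iteration
--     for tileX in range(0, len(tiles)):
--         absoluteY = -1  # allows for increment every iteration
--         prevAbsoluteX = absoluteX
--         for tileY in range(0, maxTileY):
--             absoluteX = prevAbsoluteX
--             if(maxTileY != len(tiles[tileX])):
--                 raise ValueError("Uneven tiles list provided")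
--             if not isinstance(tiles[tileX][tileY], list):
--                 raise ValueError("Tile at {0},{1} is not a pixel list"
--                     .format(tileX, tileY))
--             prevAbsoluteY = absoluteY
--             for x in range(0, len(tiles[tileX][tileY])):
--                 if not isinstance(tiles[tileX][tileY][x], list):
--                     raise ValueError("Tile at {0},{1} is not a nested pixel list"
--                         .format(tileX, tileY))
--                 absoluteY = prevAbsoluteY
--                 absoluteX += 1
--                 if absoluteX >= len(pixels):
--                     pixels.append([])
--                 for y in range(0, len(tiles[tileX][tileY][x])):
--                     absoluteY += 1
--                     if absoluteY >= len(pixels[absoluteX]):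
--                         pixels[absoluteX].append([])
--                     pixels[absoluteX][absoluteY] = tiles[tileX][tileY][x][y]
--
--     maxY = len(pixels[0])
--     for i in range(0, len(pixels)):
--         if len(pixels[i]) != maxY:
--             raise ValueError("Tiles contain uneven pixel lists")
--
--     return pixels
-- ===== SOURCE B (Python) =====
-- def untile(tiles):
--     if not isinstance(tiles, list) or not isinstance(tiles[0], list):
--         raise ValueError("Provided tiles must be a nested list")
--     maxTileY = len(tiles[0])
--     pixels = []
--     for tileX in range(len(tiles)):
--         col = tiles[tileX]
--         if len(col) != maxTileY:
--             raise ValueError("Uneven tiles list provided")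
--         for tileY in range(maxTileY):
--             if not isinstance(col[tileY], list):
--                 raise ValueError("Tile at {0},{1} is not a pixel list"
--                     .format(tileX, tileY))
--         for x in range(len(col[0])):
--             row = []
--             for tileY in range(maxTileY):
--                 if not isinstance(col[tileY][x], list):
--                     raise ValueError("Tile at {0},{1} is not a nested pixel list"
--                         .format(tileX, tileY))
--                 row += col[tileY][x]
--             pixels.append(row)
--     maxY = len(pixels[0])
--     for p in pixels:
--         if len(p) != maxY:
--             raise ValueError("Tiles contain uneven pixel lists")
--     return pixels
-- ===== Notes on version B (the rewrite author's own statement) =====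
-- stated objective: simpler
-- what changed: B rebuilds the image by appending, for each tile column, whole output rows formed by concatenating the matching pixel rows of its tiles, instead of A's per-pixel writes steered by four running absolute/previous index counters.
-- outside the precondition, e.g. on untile([[[[[1]], [[2]]], [[]]]]): A returns [[[1]], [[2]]], B raises IndexError; on untile([[[], [[[2]], [[2]]], []]]): A returns [[[2]], [[2]]], B raises IndexError
import Mathlib
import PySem

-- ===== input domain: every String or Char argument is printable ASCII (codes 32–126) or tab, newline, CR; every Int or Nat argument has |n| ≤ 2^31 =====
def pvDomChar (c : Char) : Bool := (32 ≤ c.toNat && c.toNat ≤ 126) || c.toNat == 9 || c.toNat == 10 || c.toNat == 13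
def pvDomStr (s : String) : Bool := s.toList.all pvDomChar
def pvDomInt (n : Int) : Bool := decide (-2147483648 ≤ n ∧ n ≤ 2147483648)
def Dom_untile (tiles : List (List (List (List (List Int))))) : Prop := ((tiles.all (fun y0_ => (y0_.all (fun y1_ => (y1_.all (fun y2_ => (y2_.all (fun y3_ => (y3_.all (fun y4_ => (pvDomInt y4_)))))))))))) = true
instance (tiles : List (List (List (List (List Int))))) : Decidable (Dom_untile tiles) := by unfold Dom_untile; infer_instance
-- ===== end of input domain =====

-- B rebuilds the image column by column, appending whole output rows (each the concatenation of
-- the matching pixel rows of the column's tiles) instead of A's per-pixel writes steered by four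
-- running absolute/previous index counters; same cost, no speed claim.

-- ===== PORT A =====
-- A's index counters are Int, as in Python; at every `.toNat` use site the counter was just
-- incremented past a value ≥ -1, so it is ≥ 0 and `.toNat` is exact.
-- inner y-loop: absoluteY += 1; grow pixels[absoluteX] by one cell if needed; pixels[absoluteX][absoluteY] = src[y]
def untileLoopY (absX : Int) (src : List (List Int)) (st : List (List (List Int)) × Int) :
    List (List (List Int)) × Int :=
  src.foldl (fun st v =>
    let absY := st.2 + 1
    let row := st.1.getD absX.toNat []
    let row := if (row.length : Int) ≤ absY then row ++ [[]] else row
    (st.1.set absX.toNat (row.set absY.toNat v), absY)) st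

-- x-loop: absoluteY = prevAbsoluteY; absoluteX += 1; append a fresh pixel row if needed; then the y-loop
def untileLoopX (prevAbsY : Int) (tile : List (List (List Int))) (st : List (List (List Int)) × Int × Int) :
    List (List (List Int)) × Int × Int :=
  tile.foldl (fun st r =>
    let absX := st.2.1 + 1
    let pix := if ((st.1.length : Int) ≤ absX) then st.1 ++ [[]] else st.1
    let res := untileLoopY absX r (pix, prevAbsY)
    (res.1, absX, res.2)) st

-- tileY-loop: absoluteX = prevAbsoluteX; prevAbsoluteY = absoluteY; the uneven-tiles and the two
-- isinstance checks can only raise, and raising inputs are excluded by Pre_untile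
def untileLoopTY (prevAbsX : Int) (col : List (List (List (List Int)))) (st : List (List (List Int)) × Int × Int) :
    List (List (List Int)) × Int × Int :=
  col.foldl (fun st tile => untileLoopX st.2.2 tile (st.1, prevAbsX, st.2.2)) st

-- tiles[0] on an empty argument and the final uneven-pixel-lists scan can only raise: excluded by Pre_untile
def untile (tiles : List (List (List (List (List Int))))) : List (List (List Int)) :=
  (tiles.foldl (fun st col =>
      let res := untileLoopTY st.2 col (st.1, st.2, -1)
      (res.1, res.2.1)) (([] : List (List (List Int))), (-1 : Int))).1

-- ===== PORT B =====
-- Source B's list indexing is in range on every input admitted by Pre_untile, so `getD` is exact there;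
-- Source B's raise-only validations (uneven column, final equal-length scan) are excluded by Pre_untile.
def untile_alt (tiles : List (List (List (List (List Int))))) : List (List (List Int)) :=
  let maxTileY := (tiles.headD []).length
  tiles.foldl (fun pixels col =>
    pixels ++ (List.range (col.headD []).length).map (fun x =>
      (List.range maxTileY).foldl (fun row tY => row ++ ((col.getD tY []).getD x [])) [])) []

-- ===== PRECONDITION & SPEC =====
-- total pixel-row width contributed by a column of tiles
def pvColWidth (col : List (List (List (List Int)))) : Nat :=
  (col.map (fun t => (t.headD []).length)).sum

-- Pre_untile keeps the rectangular inputs: every column has maxTileY ≥ 1 tiles, tiles within a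
-- column share one row count, rows within a tile share one width, some column has a row, and all
-- row-bearing columns have the same total width. It excludes exactly the inputs on which A raises
-- and the jagged shapes (unequal row counts or widths inside a column) on which A's per-pixel
-- bookkeeping happens to pass its final check while B naturally raises IndexError.
def Pre_untile (tiles : List (List (List (List (List Int))))) : Prop :=
  tiles ≠ [] ∧ 0 < (tiles.headD []).length ∧
  (∀ col ∈ tiles, col.length = (tiles.headD []).length ∧
    (∀ t ∈ col, t.length = (col.headD []).length) ∧
    (∀ t ∈ col, ∀ row ∈ t, row.length = (t.headD []).length)) ∧
  (∃ col ∈ tiles, 0 < (col.headD []).length) ∧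
  (∀ col₁ ∈ tiles, ∀ col₂ ∈ tiles,
    0 < (col₁.headD []).length → 0 < (col₂.headD []).length → pvColWidth col₁ = pvColWidth col₂)
instance (tiles : List (List (List (List (List Int))))) : Decidable (Pre_untile tiles) := by
  unfold Pre_untile; infer_instance

def pvWitness_untile : List (List (List (List (List Int)))) := [[[[[1]]]]]

def Spec_untile (tiles : List (List (List (List (List Int))))) (out : List (List (List Int))) : Prop := out = untile_alt tiles
instance (tiles : List (List (List (List (List Int))))) (out : List (List (List Int))) : Decidable (Spec_untile tiles out) := by unfold Spec_untile; infer_instance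

-- ===== CLAIM (what is proved, stated in full; the proofs are below) =====
def Claim_equal_untile : Prop := ∀ (tiles : List (List (List (List (List Int))))), Dom_untile tiles → Pre_untile tiles → Spec_untile tiles (untile tiles)

-- ===== LEMMAS AND PROOFS =====

-- the rows a single column contributes to the output
def colAcc (col : List (List (List (List Int)))) : List (List (List Int)) :=
  match col with
  | [] => []
  | t0 :: ts => ts.foldl (fun acc t => List.zipWith (· ++ ·) acc t) t0

theorem map_getD_range {α : Type} (l : List α) (d : α) :
    (List.range l.length).map (fun i => l.getD i d) = l := by
  apply List.ext_getElem
  · simp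
  · intro i h1 h2
    simp [List.getD_eq_getElem?_getD, h2]

theorem loopY_eq (src : List (List Int)) (full rest : List (List (List Int)))
    (row : List (List Int)) :
    untileLoopY (full.length : Int) src (full ++ row :: rest, (row.length : Int) - 1)
      = (full ++ (row ++ src) :: rest, (row.length : Int) - 1 + src.length) := by
  induction src generalizing row with
  | nil => simp [untileLoopY]
  | cons v vs ih =>
    have unfold1 : untileLoopY (full.length : Int) (v :: vs) (full ++ row :: rest, (row.length : Int) - 1)
        = untileLoopY (full.length : Int) vs (full ++ (row ++ [v]) :: rest, ((row ++ [v]).length : Int) - 1) := by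
      simp only [untileLoopY, List.foldl_cons]
      congr 1
      have e1 : (row.length : Int) - 1 + 1 = (row.length : Int) := by ring
      have e2 : (full ++ row :: rest).getD full.length [] = row := by
        simp [List.getD_eq_getElem?_getD]
      have e3 : (row ++ [[]]).set row.length v = row ++ [v] := by simp
      have e4 : (full ++ row :: rest).set full.length (row ++ [v]) = full ++ (row ++ [v]) :: rest := by simp
      simp only [Int.toNat_natCast, e1, e2, if_pos (le_refl ((row.length : Int))), e3, e4]
      refine Prod.ext rfl ?_
      simp only [List.length_append, List.length_cons, List.length_nil]; push_cast; omega
    rw [unfold1, ih (row ++ [v])]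
    have e5 : row ++ [v] ++ vs = row ++ v :: vs := by simp
    rw [e5]
    refine Prod.ext rfl ?_
    simp only [List.length_append, List.length_cons, List.length_nil]; push_cast; omega

theorem loopX_build (tile : List (List (List Int))) (full : List (List (List Int)))
    (absY0 : Int) (c : Nat) (hc : ∀ r ∈ tile, r.length = c) :
    untileLoopX (-1) tile (full, (full.length : Int) - 1, absY0)
      = (full ++ tile, (full.length : Int) - 1 + tile.length,
         if tile = [] then absY0 else (c : Int) - 1) := by
  induction tile generalizing full absY0 with
  | nil => simp [untileLoopX]
  | cons t ts ih =>
    have e1 : (full.length : Int) - 1 + 1 = (full.length : Int) := by ring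
    have unfold1 : untileLoopX (-1) (t :: ts) (full, (full.length : Int) - 1, absY0)
        = untileLoopX (-1) ts (full ++ [t], ((full ++ [t]).length : Int) - 1, -1 + (t.length : Int)) := by
      simp only [untileLoopX, List.foldl_cons]
      congr 1
      have e2 : untileLoopY (full.length : Int) t (full ++ [[]], -1)
          = (full ++ [t], -1 + (t.length : Int)) := by
        have := loopY_eq t full [] []
        simpa using this
      simp only [e1, if_pos (le_refl ((full.length : Int))), e2]
      refine Prod.ext rfl (Prod.ext ?_ rfl)
      simp only [List.length_append, List.length_cons, List.length_nil]; push_cast; omega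
    rw [unfold1, ih (full ++ [t]) (-1 + (t.length : Int)) (fun r hr => hc r (by simp [hr]))]
    have hbr : (if ts = [] then -1 + (t.length : Int) else (c : Int) - 1) = (c : Int) - 1 := by
      rw [hc t (by simp)]; split <;> ring
    rw [hbr]
    refine Prod.ext (by simp) (Prod.ext ?_ (by simp))
    simp only [List.length_append, List.length_cons, List.length_nil]; push_cast; omega

theorem loopX_ext (tile : List (List (List Int))) (partial_ full : List (List (List Int)))
    (absY0 : Int) (L c : Nat) (hlen : partial_.length = tile.length)
    (hL : ∀ p ∈ partial_, p.length = L) (hc : ∀ r ∈ tile, r.length = c) :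
    untileLoopX ((L : Int) - 1) tile (full ++ partial_, (full.length : Int) - 1, absY0)
      = (full ++ List.zipWith (· ++ ·) partial_ tile,
         (full.length : Int) - 1 + tile.length,
         if tile = [] then absY0 else (L : Int) + c - 1) := by
  induction tile generalizing partial_ full absY0 with
  | nil =>
    rw [List.length_eq_zero_iff.mp hlen]
    simp [untileLoopX]
  | cons t ts ih =>
    cases partial_ with
    | nil => simp at hlen
    | cons p ps =>
      have e1 : (full.length : Int) - 1 + 1 = (full.length : Int) := by ring
      have unfold1 : untileLoopX ((L : Int) - 1) (t :: ts) (full ++ p :: ps, (full.length : Int) - 1, absY0)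
          = untileLoopX ((L : Int) - 1) ts ((full ++ [p ++ t]) ++ ps, (((full ++ [p ++ t]).length) : Int) - 1, (L : Int) + (c : Int) - 1) := by
        simp only [untileLoopX, List.foldl_cons]
        congr 1
        have hno : ¬ ((((full ++ p :: ps).length : Nat) : Int) ≤ (full.length : Int)) := by
          simp only [List.length_append, List.length_cons]; push_cast; omega
        have e2 : untileLoopY (full.length : Int) t (full ++ p :: ps, (L : Int) - 1)
            = (full ++ (p ++ t) :: ps, (L : Int) - 1 + (t.length : Int)) := by
          have := loopY_eq t full ps p
          rw [hL p (by simp)] at this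
          exact this
        simp only [e1, if_neg hno, e2]
        refine Prod.ext ?_ (Prod.ext ?_ ?_)
        · simp
        · simp only [List.length_append, List.length_cons, List.length_nil]; push_cast; omega
        · rw [hc t (by simp)]; ring
      rw [unfold1, ih ps (full ++ [p ++ t]) ((L : Int) + (c : Int) - 1) (by simpa using hlen)
          (fun q hq => hL q (by simp [hq])) (fun r hr => hc r (by simp [hr]))]
      have hbr : (if ts = [] then (L : Int) + (c : Int) - 1 else (L : Int) + c - 1) = (L : Int) + c - 1 := by
        split <;> ring
      rw [hbr]
      refine Prod.ext (by simp) (Prod.ext ?_ (by simp))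
      simp only [List.length_append, List.length_cons, List.length_nil]; push_cast; omega

theorem zip_append_len {L c : Nat} {a b : List (List (List Int))}
    (ha : ∀ p ∈ a, p.length = L) (hb : ∀ q ∈ b, q.length = c) :
    ∀ x ∈ List.zipWith (· ++ ·) a b, x.length = L + c := by
  intro x hx
  rw [List.mem_iff_getElem] at hx
  obtain ⟨i, hi, rfl⟩ := hx
  rw [List.getElem_zipWith]
  simp only [List.length_zipWith, lt_min_iff] at hi
  rw [List.length_append, ha _ (List.getElem_mem _), hb _ (List.getElem_mem _)]

theorem loopTY_go (rest : List (List (List (List Int)))) (partial_ full : List (List (List Int)))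
    (absX0 : Int) (L r : Nat) (hlen : partial_.length = r)
    (hL : ∀ p ∈ partial_, p.length = L)
    (hrest : ∀ t ∈ rest, t.length = r ∧ (∀ row ∈ t, row.length = (t.headD []).length)) :
    untileLoopTY ((full.length : Int) - 1) rest (full ++ partial_, absX0, (L : Int) - 1)
      = (full ++ rest.foldl (fun acc t => List.zipWith (· ++ ·) acc t) partial_,
         if rest = [] then absX0 else (full.length : Int) - 1 + r,
         ((L + pvColWidth rest : Nat) : Int) - 1) := by
  induction rest generalizing partial_ absX0 L with
  | nil => simp [untileLoopTY, pvColWidth]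
  | cons t ts ih =>
    have hc : ∀ row ∈ t, row.length = (t.headD []).length := (hrest t (by simp)).2
    have htr : t.length = r := (hrest t (by simp)).1
    set c := (t.headD []).length with hcdef
    have unfold1 : untileLoopTY ((full.length : Int) - 1) (t :: ts) (full ++ partial_, absX0, (L : Int) - 1)
        = untileLoopTY ((full.length : Int) - 1) ts
            (full ++ List.zipWith (· ++ ·) partial_ t, (full.length : Int) - 1 + r, (((L + c : Nat)) : Int) - 1) := by
      simp only [untileLoopTY, List.foldl_cons]
      congr 1
      rw [loopX_ext t partial_ full ((L : Int) - 1) L c (by omega) hL hc]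
      refine Prod.ext rfl (Prod.ext (by rw [htr]) ?_)
      cases t with
      | nil => simp [hcdef]
      | cons r0 rs => push_cast; simp
    rw [unfold1, ih (List.zipWith (· ++ ·) partial_ t) ((full.length : Int) - 1 + r) (L + c)
        (by simp [List.length_zipWith, hlen, htr])
        (zip_append_len hL hc)
        (fun t' ht' => hrest t' (by simp [ht']))]
    refine Prod.ext (by simp) (Prod.ext (by simp) ?_)
    have : pvColWidth (t :: ts) = c + pvColWidth ts := by simp [pvColWidth, hcdef]
    rw [this]
    push_cast; ring

theorem loopTY_col (col : List (List (List (List Int)))) (full : List (List (List Int)))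
    (absX0 : Int) (hne : col ≠ [])
    (hr : ∀ t ∈ col, t.length = (col.headD []).length)
    (hw : ∀ t ∈ col, ∀ row ∈ t, row.length = (t.headD []).length) :
    untileLoopTY ((full.length : Int) - 1) col (full, absX0, -1)
      = (full ++ colAcc col, (full.length : Int) - 1 + (col.headD []).length,
         ((pvColWidth col : Nat) : Int) - 1) := by
  cases col with
  | nil => exact absurd rfl hne
  | cons t0 ts =>
    have hr0 : t0.length = ((t0 :: ts).headD []).length := by simp
    have unfold1 : untileLoopTY ((full.length : Int) - 1) (t0 :: ts) (full, absX0, -1)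
        = untileLoopTY ((full.length : Int) - 1) ts
            (full ++ t0, (full.length : Int) - 1 + t0.length, (((t0.headD []).length : Nat) : Int) - 1) := by
      simp only [untileLoopTY, List.foldl_cons]
      congr 1
      rw [show (-1 : Int) = (full.length : Int) - 1 - ((full.length : Int) - 1) + -1 by ring]
      have := loopX_build t0 full (-1) ((t0.headD []).length) (hw t0 (by simp))
      rw [show ((full.length : Int) - 1 - ((full.length : Int) - 1) + -1) = (-1 : Int) by ring, this]
      refine Prod.ext rfl (Prod.ext rfl ?_)
      cases t0 with
      | nil => simp
      | cons r0 rs => simp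
    rw [unfold1,
      loopTY_go ts t0 full ((full.length : Int) - 1 + t0.length) ((t0.headD []).length) t0.length rfl
        (hw t0 (by simp))
        (fun t ht => ⟨by rw [hr t (by simp [ht])]; simp, hw t (by simp [ht])⟩)]
    refine Prod.ext (by simp [colAcc]) (Prod.ext (by simp) ?_)
    have : pvColWidth (t0 :: ts) = (t0.headD []).length + pvColWidth ts := by simp [pvColWidth]
    rw [this]

theorem foldl_zip_len (ts : List (List (List (List Int)))) (partial_ : List (List (List Int)))
    (r : Nat) (h0 : partial_.length = r) (h : ∀ t ∈ ts, t.length = r) :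
    (ts.foldl (fun acc t => List.zipWith (· ++ ·) acc t) partial_).length = r := by
  induction ts generalizing partial_ with
  | nil => simpa using h0
  | cons t ts ih =>
    simp only [List.foldl_cons]
    exact ih _ (by simp [List.length_zipWith, h0, h t (by simp)])
      (fun t' ht' => h t' (by simp [ht']))

theorem colAcc_len (col : List (List (List (List Int)))) (hne : col ≠ [])
    (hr : ∀ t ∈ col, t.length = (col.headD []).length) :
    (colAcc col).length = (col.headD []).length := by
  cases col with
  | nil => exact absurd rfl hne
  | cons t0 ts =>
    simp only [colAcc, List.headD_cons]
    exact foldl_zip_len ts t0 t0.length rfl (fun t ht => by rw [hr t (by simp [ht])]; simp)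

theorem untile_flat (tiles : List (List (List (List (List Int)))))
    (h : ∀ col ∈ tiles, col ≠ [] ∧
      (∀ t ∈ col, t.length = (col.headD []).length) ∧
      (∀ t ∈ col, ∀ row ∈ t, row.length = (t.headD []).length)) :
    untile tiles = tiles.foldl (fun acc col => acc ++ colAcc col) [] := by
  unfold untile
  have hgo : ∀ (tl : List (List (List (List (List Int))))) (acc : List (List (List Int))),
      (∀ col ∈ tl, col ≠ [] ∧
        (∀ t ∈ col, t.length = (col.headD []).length) ∧
        (∀ t ∈ col, ∀ row ∈ t, row.length = (t.headD []).length)) →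
      tl.foldl (fun st col =>
          let res := untileLoopTY st.2 col (st.1, st.2, -1)
          (res.1, res.2.1)) (acc, (acc.length : Int) - 1)
        = (tl.foldl (fun acc col => acc ++ colAcc col) acc,
           ((tl.foldl (fun acc col => acc ++ colAcc col) acc).length : Int) - 1) := by
    intro tl
    induction tl with
    | nil => intro acc _; simp
    | cons col cols ih =>
      intro acc hh
      obtain ⟨hne, hr, hw⟩ := hh col (by simp)
      simp only [List.foldl_cons]
      have e : (((untileLoopTY ((acc.length : Int) - 1) col (acc, (acc.length : Int) - 1, -1)).1,
                 (untileLoopTY ((acc.length : Int) - 1) col (acc, (acc.length : Int) - 1, -1)).2.1)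
               : List (List (List Int)) × Int)
             = (acc ++ colAcc col, ((acc ++ colAcc col).length : Int) - 1) := by
        rw [loopTY_col col acc ((acc.length : Int) - 1) hne hr hw]
        refine Prod.ext rfl ?_
        rw [List.length_append, colAcc_len col hne hr]; push_cast; ring
      rw [e]
      exact ih (acc ++ colAcc col) (fun c hc => hh c (by simp [hc]))
  have h0 := hgo tiles [] h
  simp only [List.length_nil, Nat.cast_zero, zero_sub] at h0
  rw [h0]

theorem range_foldl (col : List (List (List (List Int)))) (x : Nat) (init : List (List Int)) :
    (List.range col.length).foldl (fun row tY => row ++ ((col.getD tY []).getD x [])) init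
      = col.foldl (fun row t => row ++ t.getD x []) init := by
  conv_rhs => rw [← map_getD_range col []]
  rw [List.foldl_map]

theorem getD_zip_append (a b : List (List (List Int))) (x : Nat)
    (h1 : x < a.length) (h2 : x < b.length) :
    (List.zipWith (· ++ ·) a b).getD x [] = a.getD x [] ++ b.getD x [] := by
  have h3 : x < (List.zipWith (· ++ ·) a b).length := by
    simp [List.length_zipWith]; omega
  simp [List.getD_eq_getElem?_getD, h1, h2]

theorem colAcc_rows (ts : List (List (List (List Int)))) (partial_ : List (List (List Int)))
    (r : Nat) (h0 : partial_.length = r) (h : ∀ t ∈ ts, t.length = r) :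
    ts.foldl (fun acc t => List.zipWith (· ++ ·) acc t) partial_
      = (List.range r).map (fun x =>
          ts.foldl (fun row t => row ++ t.getD x []) (partial_.getD x [])) := by
  induction ts generalizing partial_ with
  | nil => subst h0; simpa using (map_getD_range partial_ []).symm
  | cons t ts ih =>
    simp only [List.foldl_cons]
    rw [ih (List.zipWith (· ++ ·) partial_ t)
        (by simp [List.length_zipWith, h0, h t (by simp)])
        (fun t' ht' => h t' (by simp [ht']))]
    apply List.map_congr_left
    intro x hx
    rw [List.mem_range] at hx
    rw [getD_zip_append _ _ _ (by omega) (by rw [h t (by simp)]; exact hx)]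

theorem alt_flat (tiles : List (List (List (List (List Int)))))
    (h : ∀ col ∈ tiles, col ≠ [] ∧ col.length = (tiles.headD []).length ∧
      (∀ t ∈ col, t.length = (col.headD []).length)) :
    untile_alt tiles = tiles.foldl (fun acc col => acc ++ colAcc col) [] := by
  simp only [untile_alt]
  apply PySem.List.foldl_congr_mem
  intro acc col hcol
  obtain ⟨hne, hlen, hr⟩ := h col hcol
  congr 1
  rw [← hlen]
  cases col with
  | nil => exact absurd rfl hne
  | cons t0 ts =>
    simp only [List.headD_cons, colAcc]
    rw [colAcc_rows ts t0 t0.length rfl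
        (fun t ht => by simpa using hr t (by simp [ht]))]
    apply List.map_congr_left
    intro x hx
    rw [range_foldl (t0 :: ts) x []]
    simp

-- ===== VERDICT (by name: the statement is the Claim_ definition above) =====
theorem untile_spec : Claim_equal_untile := by
  intro tiles _hdom hpre
  obtain ⟨hne, hm, hshape, -, -⟩ := hpre
  unfold Spec_untile
  rw [untile_flat, alt_flat]
  · intro col hcol
    obtain ⟨hlen, hr⟩ := hshape col hcol
    refine ⟨?_, hlen, hr.1⟩
    intro h0; rw [h0] at hlen; simp only [List.length_nil] at hlen; omega
  · intro col hcol
    obtain ⟨hlen, hr⟩ := hshape col hcol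
    refine ⟨?_, hr.1, hr.2⟩
    intro h0; rw [h0] at hlen; simp only [List.length_nil] at hlen; omega
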